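-- pv_equiv track=rewrite | github.com/CiroExe/Teoria-de-la-informacion | tp4/ej14.py | Decodifica
-- ===== SOURCE A (Python) =====
-- def Decodifica(mensaje, codigo, fuente):
--     i=0
--     decodificado = ""
--     buffer = ""
--
--     for letra in mensaje:
--         buffer += letra
--         for i in range(len(codigo)):
--             if (buffer  == codigo[i]):
--                 decodificado += fuente[i]
--                 buffer = ""
--     return decodificado
--
-- fuente = ['S1', 'S2', 'S3', 'S4']
--
-- codigo = ['BA', 'CAB', 'A', 'CBA']
-- ===== SOURCE B (Python) =====
-- def Decodifica(mensaje, codigo, fuente):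
--     # Build a hash index once: codeword -> symbol (first index wins),
--     # plus the set of all proper prefixes of codewords.
--     codemap = {}
--     prefixes = set()
--     for cw, sym in zip(codigo, fuente):
--         if cw not in codemap:
--             codemap[cw] = sym
--         p = ""
--         for ch in cw:
--             prefixes.add(p)
--             p += ch
--     out = ""
--     buffer = ""
--     for letra in mensaje:
--         if buffer is None:
--             break
--         buffer += letra
--         if buffer in codemap:
--             out += codemap[buffer]
--             buffer = ""
--         elif buffer not in prefixes:
--             buffer = None  # dead: no extension of buffer can ever match
--     return out
-- ===== Notes on version B (the rewrite author's own statement) =====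
-- stated objective: faster
-- what changed: B replaces A's per-letter linear rescan of the codeword list (against a buffer that grows forever once it stops matching) by a hash index codeword->symbol plus a set of proper codeword prefixes, built once, and a permanent dead state entered as soon as the buffer is no longer a prefix of any codeword.
-- outside the precondition, e.g. on Decodifica('AB', ['AB', 'B'], ['S1']): A returns 'S1', B returns 'S1'; on Decodifica('A', ['A', '', 'B'], ['S1', 'S2', 'S3']): A returns 'S1S2', B returns 'S1'
import Mathlib
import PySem

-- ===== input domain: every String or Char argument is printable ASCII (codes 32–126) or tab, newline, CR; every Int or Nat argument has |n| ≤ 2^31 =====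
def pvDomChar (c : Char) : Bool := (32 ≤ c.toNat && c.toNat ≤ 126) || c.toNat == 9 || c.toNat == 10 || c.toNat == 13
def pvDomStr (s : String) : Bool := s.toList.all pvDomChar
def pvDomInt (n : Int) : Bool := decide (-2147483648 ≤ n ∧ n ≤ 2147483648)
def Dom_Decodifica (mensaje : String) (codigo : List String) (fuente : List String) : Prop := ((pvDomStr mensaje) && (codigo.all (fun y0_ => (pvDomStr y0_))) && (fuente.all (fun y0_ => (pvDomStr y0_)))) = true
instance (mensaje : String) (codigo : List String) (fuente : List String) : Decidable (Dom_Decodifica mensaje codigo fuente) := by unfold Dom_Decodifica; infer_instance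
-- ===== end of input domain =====

-- B replaces A's per-letter linear scan of the codeword list by a hash index (codeword → symbol,
-- first index wins) plus the set of proper codeword prefixes, entering a permanent dead state as
-- soon as the buffer stops being a prefix of any codeword.

-- ===== PORT A =====
def Decodifica (mensaje : String) (codigo : List String) (fuente : List String) : String :=
  -- for letra in mensaje: buffer += letra; for i in range(len(codigo)): if buffer == codigo[i]: …
  (mensaje.toList.foldl
    (fun (st : String × String) letra =>
      (PySem.List.pyRange 0 (codigo.length : Int) 1).foldl
        (fun (st2 : String × String) i =>
          if st2.2 == PySem.List.pyGetD codigo i "" then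
            (st2.1 ++ PySem.List.pyGetD fuente i "", "")
          else st2)
        (st.1, st.2.push letra))
    ("", "")).1

-- ===== PORT B =====
def Decodifica_alt (mensaje : String) (codigo : List String) (fuente : List String) : String :=
  let maps := (codigo.zip fuente).foldl
    (fun (mp : PySem.Dict String String × PySem.Set String) p =>
      (if mp.1.contains p.1 then mp.1 else mp.1.insert p.1 p.2,
       (p.1.toList.foldl
          (fun (sq : PySem.Set String × String) ch =>
            (PySem.Set.add sq.1 sq.2, sq.2.push ch)) (mp.2, "")).1))
    (PySem.Dict.empty, PySem.Set.empty)
  (mensaje.toList.foldl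
    (fun (st : String × Option String) letra =>
      match st.2 with
      | none => st                                  -- dead: 'if buffer is None: break'
      | some b =>
        let buffer := b.push letra
        match maps.1.get? buffer with
        | some sym => (st.1 ++ sym, some "")
        | none =>
          if PySem.Set.contains maps.2 buffer then (st.1, some buffer) else (st.1, none))
    ("", some "")).1

-- ===== PRECONDITION & SPEC =====
-- Pre_ excludes (a) inputs where a codeword past len(fuente) occurs as a substring of mensaje —
-- a matched codeword past len(fuente) makes A raise IndexError (the closed form over-excludes:
-- see cites for an input A still returns on) — and (b) codeword lists containing the empty
-- string, on which A's cascade of extra empty-codeword emissions after each reset is an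
-- accident of its inner loop continuing with buffer = "".
def Pre_Decodifica (mensaje : String) (codigo : List String) (fuente : List String) : Prop :=
  "" ∉ codigo ∧ ∀ s ∈ codigo.drop fuente.length, ¬ (s.toList <:+: mensaje.toList)
instance (mensaje : String) (codigo : List String) (fuente : List String) : Decidable (Pre_Decodifica mensaje codigo fuente) := by unfold Pre_Decodifica; infer_instance

def pvWitness_Decodifica : String × List String × List String :=
  ("BACABA", ["BA", "CAB", "A", "CBA"], ["S1", "S2", "S3", "S4"])

def Spec_Decodifica (mensaje : String) (codigo : List String) (fuente : List String) (out : String) : Prop := out = Decodifica_alt mensaje codigo fuente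
instance (mensaje : String) (codigo : List String) (fuente : List String) (out : String) : Decidable (Spec_Decodifica mensaje codigo fuente out) := by unfold Spec_Decodifica; infer_instance

-- ===== CLAIM (what is proved, stated in full; the proofs are below) =====
def Claim_equal_Decodifica : Prop := ∀ (mensaje : String) (codigo : List String) (fuente : List String), Dom_Decodifica mensaje codigo fuente → Pre_Decodifica mensaje codigo fuente → Spec_Decodifica mensaje codigo fuente (Decodifica mensaje codigo fuente)

-- ===== LEMMAS AND PROOFS =====

-- proof-side abbreviations for the loop bodies
def zstep (st : String × String) (p : String × String) : String × String :=
  if st.2 == p.1 then (st.1 ++ p.2, "") else st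

def cmStep (m : PySem.Dict String String) (p : String × String) : PySem.Dict String String :=
  if m.contains p.1 then m else m.insert p.1 p.2

def pfStep (s : PySem.Set String) (p : String × String) : PySem.Set String :=
  (p.1.toList.foldl
     (fun (sq : PySem.Set String × String) ch =>
       (PySem.Set.add sq.1 sq.2, sq.2.push ch)) (s, "")).1

def isPfx (pairs : List (String × String)) (b : String) : Prop :=
  ∃ p ∈ pairs, ∃ k < p.1.toList.length, b = String.ofList (p.1.toList.take k)

def astepR (codigo fuente : List String) (st2 : String × String) (i : Int) : String × String :=
  if st2.2 == PySem.List.pyGetD codigo i "" then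
    (st2.1 ++ PySem.List.pyGetD fuente i "", "")
  else st2

theorem inner_eq (codigo fuente : List String) (st : String × String) :
    (PySem.List.pyRange 0 (((codigo.zip fuente).length : Int)) 1).foldl (astepR codigo fuente) st
    = (codigo.zip fuente).foldl zstep st := by
  rw [← PySem.List.foldl_pyRange_zero_pyGetD' (codigo.zip fuente) ("","") zstep st]
  apply PySem.List.foldl_congr_mem
  intro acc i hi
  rw [PySem.List.mem_pyRange_one] at hi
  have h0 : 0 ≤ i := hi.1
  have hiz : i < ((codigo.zip fuente).length : Int) := hi.2
  have h1 : i.toNat < (codigo.zip fuente).length := by omega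
  have hzl : (codigo.zip fuente).length = min codigo.length fuente.length := List.length_zip
  unfold astepR
  rw [PySem.List.pyGetD_eq_getElem (codigo.zip fuente) ("","") h0 (by omega),
      PySem.List.pyGetD_eq_getElem codigo "" h0 (by omega),
      PySem.List.pyGetD_eq_getElem fuente "" h0 (by omega)]
  simp [zstep, List.getElem_zip]

theorem fold_id (codigo fuente : List String) (l : List Int) (st : String × String)
    (h : ∀ i ∈ l, (st.2 == PySem.List.pyGetD codigo i "") = false) :
    l.foldl (astepR codigo fuente) st = st := by
  induction l with
  | nil => rfl
  | cons i t ih =>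
    simp only [List.foldl_cons, astepR, h i (by simp)]
    exact ih fun j hj => h j (by simp [hj])

theorem zfold_empty (l : List (String × String)) (d : String)
    (h : ∀ p ∈ l, p.1 ≠ "") : l.foldl zstep (d, "") = (d, "") := by
  induction l with
  | nil => rfl
  | cons p t ih =>
    have hp : p.1 ≠ "" := h p (by simp)
    simp only [List.foldl_cons, zstep]
    rw [if_neg (by simpa using hp)]
    exact ih fun q hq => h q (by simp [hq])


theorem zfold_char (l : List (String × String)) (d b : String) (hb : b ≠ "")
    (h : ∀ p ∈ l, p.1 ≠ "") :
    l.foldl zstep (d, b) =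
      match l.find? (fun p => p.1 == b) with
      | some p => (d ++ p.2, "")
      | none => (d, b) := by
  induction l generalizing d with
  | nil => rfl
  | cons p t ih =>
    by_cases hpb : p.1 = b
    · simp only [List.foldl_cons, zstep, List.find?_cons, hpb]
      rw [if_pos (by simp)]
      simp only [beq_self_eq_true, cond_true]
      exact zfold_empty t (d ++ p.2) fun q hq => h q (by simp [hq])
    · simp only [List.foldl_cons, zstep, List.find?_cons]
      rw [if_neg (by simpa using fun hh => hpb hh.symm)]
      have : (p.1 == b) = false := by simp [hpb]
      rw [this]
      simpa using ih d (fun q hq => h q (by simp [hq]))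


theorem cm_get? (l : List (String × String)) (m : PySem.Dict String String) (b : String) :
    (l.foldl cmStep m).get? b =
      match m.get? b with
      | some v => some v
      | none => (l.find? (fun p => p.1 == b)).map (·.2) := by
  induction l generalizing m with
  | nil =>
    simp only [List.foldl_nil, List.find?_nil]
    cases m.get? b <;> rfl
  | cons p t ih =>
    simp only [List.foldl_cons, List.find?_cons]
    rw [ih]
    by_cases hpb : p.1 = b
    · subst hpb
      simp only [beq_self_eq_true, cond_true]
      by_cases hc : m.contains p.1 = true
      · rw [cmStep, if_pos hc]
        rw [PySem.Dict.contains_eq_isSome_get?] at hc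
        cases hm : m.get? p.1 with
        | none => rw [hm] at hc; simp at hc
        | some v => rfl
      · rw [cmStep, if_neg hc]
        rw [PySem.Dict.contains_eq_isSome_get?] at hc
        cases hm : m.get? p.1 with
        | some v => rw [hm] at hc; simp at hc
        | none =>
          rw [PySem.Dict.get?_insert, if_pos rfl]
          rfl
    · have hbeq : (p.1 == b) = false := by simp [hpb]
      rw [hbeq]
      simp only [cond_false]
      by_cases hc : m.contains p.1 = true
      · rw [cmStep, if_pos hc]
      · rw [cmStep, if_neg hc, PySem.Dict.get?_insert, if_neg (fun hh => hpb hh.symm)]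


theorem pfx_inner (l : List Char) (s : PySem.Set String) (q : String) (x : String) :
    x ∈ (l.foldl
        (fun (sq : PySem.Set String × String) ch =>
          (PySem.Set.add sq.1 sq.2, sq.2.push ch)) (s, q)).1 ↔
      x ∈ s ∨ ∃ k < l.length, x = q ++ String.ofList (l.take k) := by
  induction l generalizing s q with
  | nil => simp
  | cons c t ih =>
    simp only [List.foldl_cons]
    rw [ih]
    constructor
    · rintro (hs | ⟨k, hk, hx⟩)
      · rw [PySem.Set.mem_add] at hs
        rcases hs with hs | hs
        · exact Or.inl hs
        · refine Or.inr ⟨0, by simp, ?_⟩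
          subst hs
          apply String.toList_inj.mp; simp
      · refine Or.inr ⟨k + 1, by simpa using hk, ?_⟩
        subst hx
        apply String.toList_inj.mp; simp
    · rintro (hs | ⟨k, hk, hx⟩)
      · exact Or.inl (by rw [PySem.Set.mem_add]; exact Or.inl hs)
      · cases k with
        | zero =>
          refine Or.inl ?_
          rw [PySem.Set.mem_add]
          refine Or.inr ?_
          subst hx; apply String.toList_inj.mp; simp
        | succ j =>
          refine Or.inr ⟨j, by simpa using hk, ?_⟩
          subst hx; apply String.toList_inj.mp; simp


theorem pf_mem (l : List (String × String)) (s : PySem.Set String) (x : String) :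
    x ∈ l.foldl pfStep s ↔ x ∈ s ∨ isPfx l x := by
  induction l generalizing s with
  | nil => simp [isPfx]
  | cons p t ih =>
    simp only [List.foldl_cons]
    rw [ih, pfStep, pfx_inner]
    unfold isPfx
    constructor
    · rintro ((hs | ⟨k, hk, hx⟩) | ⟨q, hq, hk⟩)
      · exact Or.inl hs
      · exact Or.inr ⟨p, by simp, k, hk, by simpa using hx⟩
      · exact Or.inr ⟨q, by simp [hq], hk⟩
    · rintro (hs | ⟨q, hq, k, hk, hx⟩)
      · exact Or.inl (Or.inl hs)
      · rcases List.mem_cons.mp hq with h | h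
        · subst h; exact Or.inl (Or.inr ⟨k, hk, by simpa using hx⟩)
        · exact Or.inr ⟨q, h, k, hk, hx⟩


theorem push_ne_empty (b : String) (ch : Char) : b.push ch ≠ "" := by
  intro h
  have := congrArg String.toList h
  simp at this


theorem find?_push (pairs : List (String × String)) (b : String) (ch : Char) (p : String × String)
    (h : pairs.find? (fun q => q.1 == b.push ch) = some p) : isPfx pairs b := by
  have hp : p.1 = b.push ch := by
    have := List.find?_some h
    simpa using this
  refine ⟨p, List.mem_of_find?_eq_some h, b.toList.length, ?_, ?_⟩
  · rw [hp]; simp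
  · rw [hp]
    apply String.toList_inj.mp
    simp


theorem pfx_push (pairs : List (String × String)) (b : String) (ch : Char)
    (h : isPfx pairs (b.push ch)) : isPfx pairs b := by
  obtain ⟨p, hmem, k, hk, hx⟩ := h
  have hl : b.toList ++ [ch] = p.1.toList.take k := by
    have := congrArg String.toList hx
    simpa using this
  have hlen : b.toList.length + 1 = k := by
    have h2 := congrArg List.length hl
    rw [List.length_take, min_eq_left hk.le] at h2
    simpa using h2
  refine ⟨p, hmem, b.toList.length, by omega, ?_⟩
  apply String.toList_inj.mp
  simp only [String.toList_ofList]
  have : p.1.toList.take b.toList.length = (p.1.toList.take k).take b.toList.length := by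
    rw [List.take_take]
    congr 1
    omega
  rw [this, ← hl, List.take_left]


-- one outer step of A: the scan over ALL of codigo equals the scan over the zip part,
-- provided the buffer differs from every codeword past len(fuente)
theorem step_eq (codigo fuente : List String) (hemp : "" ∉ codigo) (d b : String)
    (htail : ∀ s ∈ codigo.drop fuente.length, s ≠ b) (hb : b ≠ "") :
    (PySem.List.pyRange 0 ((codigo.length : Int)) 1).foldl (astepR codigo fuente) (d, b)
    = (codigo.zip fuente).foldl zstep (d, b) := by
  have hne : ∀ p ∈ codigo.zip fuente, p.1 ≠ "" :=
    fun p hm h1 => hemp (by rw [← h1]; exact (List.of_mem_zip hm).1)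
  have hzl : (codigo.zip fuente).length = min codigo.length fuente.length := List.length_zip
  have hm : ((codigo.zip fuente).length : Int) ≤ (codigo.length : Int) := by
    rw [hzl]; exact_mod_cast Nat.min_le_left _ _
  rw [PySem.List.pyRange_one_append 0 ((codigo.zip fuente).length : Int) (codigo.length : Int)
        (by positivity) hm,
      List.foldl_append, inner_eq]
  apply fold_id
  intro i hi
  rw [PySem.List.mem_pyRange_one] at hi
  have h0 : 0 ≤ i := le_trans (by positivity) hi.1
  have hif : fuente.length ≤ i.toNat := by omega
  have hic : i.toNat < codigo.length := by omega
  rw [PySem.List.pyGetD_eq_getElem codigo "" h0 (by omega)]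
  have hmem : codigo[i.toNat] ∈ codigo.drop fuente.length := by
    have hd : i.toNat - fuente.length < (codigo.drop fuente.length).length := by
      rw [List.length_drop]; omega
    have h5 : (codigo.drop fuente.length)[i.toNat - fuente.length]'hd = codigo[i.toNat] := by
      rw [List.getElem_drop]
      congr 1
      omega
    rw [← h5]
    exact List.getElem_mem _
  rw [zfold_char _ _ _ hb hne]
  cases hf : (codigo.zip fuente).find? (fun p => p.1 == b) with
  | some p =>
    simp only
    rw [beq_eq_false_iff_ne]
    exact fun hh => hemp (by rw [hh]; exact List.drop_subset _ _ hmem)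
  | none =>
    simp only
    rw [beq_eq_false_iff_ne]
    exact fun hh => htail _ hmem hh.symm

def AouterF (c f : List String) (st : String × String) (ch : Char) : String × String :=
  (PySem.List.pyRange 0 ((c.length : Int)) 1).foldl (astepR c f) (st.1, st.2.push ch)

def Bouter (cm : PySem.Dict String String) (pf : PySem.Set String)
    (st : String × Option String) (ch : Char) : String × Option String :=
  match st.2 with
  | none => st
  | some b =>
    let buffer := b.push ch
    match cm.get? buffer with
    | some sym => (st.1 ++ sym, some "")
    | none => if PySem.Set.contains pf buffer then (st.1, some buffer) else (st.1, none)

theorem run_eq (c f : List String) (hemp : "" ∉ c)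
    (cm : PySem.Dict String String) (pf : PySem.Set String)
    (hcm : ∀ b, cm.get? b = ((c.zip f).find? (fun p => p.1 == b)).map (·.2))
    (hpf : ∀ b, PySem.Set.contains pf b = true ↔ isPfx (c.zip f) b)
    (ms : List Char) :
    ∀ (d b : String) (o : Option String),
    (o = some b ∨ (o = none ∧ (c.zip f).find? (fun p => p.1 == b) = none ∧ ¬ isPfx (c.zip f) b)) →
    (∀ s ∈ c.drop f.length, ¬ (s.toList <:+: (b.toList ++ ms))) →
    (ms.foldl (AouterF c f) (d, b)).1 = (ms.foldl (Bouter cm pf) (d, o)).1 := by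
  have hne : ∀ p ∈ c.zip f, p.1 ≠ "" :=
    fun p hm h1 => hemp (by rw [← h1]; exact (List.of_mem_zip hm).1)
  induction ms with
  | nil => rintro d b o (rfl | ⟨rfl, _, _⟩) _ <;> rfl
  | cons ch t ih =>
    rintro d b o ho hinf
    have hbp : (b.push ch).toList = b.toList ++ [ch] := by simp
    have htail : ∀ s ∈ c.drop f.length, s ≠ b.push ch := by
      intro s hs hh
      apply hinf s hs
      exact ⟨[], t, by simp [hh]⟩
    have hinf_keep : ∀ s ∈ c.drop f.length, ¬ (s.toList <:+: ((b.push ch).toList ++ t)) := by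
      intro s hs h
      apply hinf s hs
      rw [hbp, List.append_assoc] at h
      simpa using h
    have hinf_reset : ∀ s ∈ c.drop f.length, ¬ (s.toList <:+: (("" : String).toList ++ t)) := by
      intro s hs h
      apply hinf s hs
      have ht : ("" : String).toList ++ t = t := by simp
      rw [ht] at h
      refine h.trans (List.IsSuffix.isInfix ⟨b.toList ++ [ch], by simp⟩)
    rcases ho with rfl | ⟨rfl, hfind, hpfx⟩
    · -- live state
      simp only [List.foldl_cons]
      rw [show AouterF c f (d, b) ch = (c.zip f).foldl zstep (d, b.push ch) from
            step_eq c f hemp d (b.push ch) htail (push_ne_empty b ch)]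
      rw [zfold_char _ _ _ (push_ne_empty b ch) hne]
      show _ = (t.foldl (Bouter cm pf) (Bouter cm pf (d, some b) ch)).1
      have hB : Bouter cm pf (d, some b) ch =
          match cm.get? (b.push ch) with
          | some sym => (d ++ sym, some "")
          | none => if PySem.Set.contains pf (b.push ch) then (d, some (b.push ch))
                    else (d, none) := rfl
      rw [hB, hcm (b.push ch)]
      cases hf : (c.zip f).find? (fun p => p.1 == b.push ch) with
      | some p =>
        simp only [Option.map_some]
        exact ih (d ++ p.2) "" (some "") (Or.inl rfl) hinf_reset
      | none =>
        simp only [Option.map_none]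
        by_cases hc : PySem.Set.contains pf (b.push ch) = true
        · rw [if_pos hc]
          exact ih d (b.push ch) (some (b.push ch)) (Or.inl rfl) hinf_keep
        · rw [if_neg hc]
          exact ih d (b.push ch) none
            (Or.inr ⟨rfl, hf, fun hp => hc ((hpf _).mpr hp)⟩) hinf_keep
    · -- dead state
      simp only [List.foldl_cons]
      rw [show AouterF c f (d, b) ch = (c.zip f).foldl zstep (d, b.push ch) from
            step_eq c f hemp d (b.push ch) htail (push_ne_empty b ch)]
      have hf : (c.zip f).find? (fun p => p.1 == b.push ch) = none := by
        cases hf : (c.zip f).find? (fun p => p.1 == b.push ch) with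
        | none => rfl
        | some p => exact absurd (find?_push (c.zip f) b ch p hf) hpfx
      rw [zfold_char _ _ _ (push_ne_empty b ch) hne, hf]
      exact ih d (b.push ch) none
        (Or.inr ⟨rfl, hf, fun hp => hpfx (pfx_push (c.zip f) b ch hp)⟩) hinf_keep

-- ===== VERDICT (by name: the statement is the Claim_ definition above) =====
theorem Decodifica_spec : Claim_equal_Decodifica := by
  intro m c f _hdom hpre
  obtain ⟨hemp, hinf⟩ := hpre
  unfold Spec_Decodifica Decodifica Decodifica_alt
  rw [show (fun (mp : PySem.Dict String String × PySem.Set String) (p : String × String) =>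
        (if mp.1.contains p.1 then mp.1 else mp.1.insert p.1 p.2,
         (p.1.toList.foldl (fun (sq : PySem.Set String × String) ch =>
            (PySem.Set.add sq.1 sq.2, sq.2.push ch)) (mp.2, "")).1))
      = (fun (mp : PySem.Dict String String × PySem.Set String) (p : String × String) =>
          (cmStep mp.1 p, pfStep mp.2 p)) from rfl]
  rw [PySem.List.foldl_prod_mk cmStep pfStep]
  rw [show (fun (st : String × String) letra =>
      (PySem.List.pyRange 0 (c.length : Int) 1).foldl
        (fun (st2 : String × String) i =>
          if st2.2 == PySem.List.pyGetD c i "" then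
            (st2.1 ++ PySem.List.pyGetD f i "", "")
          else st2)
        (st.1, st.2.push letra)) = AouterF c f from rfl]
  exact run_eq c f hemp _ _
    (fun b => by rw [cm_get? (c.zip f) PySem.Dict.empty b, PySem.Dict.get?_empty])
    (fun b => by
      rw [PySem.Set.contains_iff, pf_mem]
      simp [PySem.Set.empty])
    m.toList "" "" (some "") (Or.inl rfl)
    (fun s hs h => hinf s hs (by simpa using h))
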